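-- pv_equiv track=rewrite | github.com/sugipamo/oopstracker | src/oopstracker/function_mapper.py | diversity_sampling
-- ===== SOURCE A (Python) =====
-- from typing import List, Dict, Any, Tuple, Optional
--
-- def diversity_sampling(functions: List[str], count: int = 5) -> List[int]:
--     """Select diverse functions based on code patterns."""
--     # Simple diversity based on function length and complexity
--     function_features = []
--     for func in functions:
--         lines = len(func.split('\n'))
--         complexity = func.count('if') + func.count('for') + func.count('while') + func.count('try')
--         function_features.append((lines, complexity))
--
--     # K-means-like selection for diversity
--     selected_indices = []
--     while len(selected_indices) < min(count, len(functions)):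
--         # Find most different function from already selected
--         best_idx = 0
--         best_distance = -1
--
--         for i, feature in enumerate(function_features):
--             if i in selected_indices:
--                 continue
--
--             min_distance = float('inf')
--             for selected_idx in selected_indices:
--                 distance = abs(feature[0] - function_features[selected_idx][0]) + \
--                           abs(feature[1] - function_features[selected_idx][1])
--                 min_distance = min(min_distance, distance)
--
--             if len(selected_indices) == 0 or min_distance > best_distance:
--                 best_distance = min_distance
--                 best_idx = i
--
--         selected_indices.append(best_idx)
--
--     return selected_indices
-- ===== SOURCE B (Python) =====
-- def diversity_sampling(functions, count=5):
--     """Select diverse functions based on code patterns (farthest-point sampling,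
--     incremental min-distance array: O(count*n) instead of O(count^2*n))."""
--     feats = []
--     for f in functions:
--         feats.append((len(f.split('\n')),
--                       f.count('if') + f.count('for') + f.count('while') + f.count('try')))
--     n = len(functions)
--     m = min(count, n)
--     if m <= 0:
--         return []
--     # The first pick of farthest-point sampling here is the last index.
--     selected = [n - 1]
--     last = feats[n - 1]
--     # mind[i] = min distance from i to the selected set; -1 marks an already-selected index.
--     mind = [abs(a - last[0]) + abs(b - last[1]) for (a, b) in feats]
--     mind[n - 1] = -1
--     for _ in range(m - 1):
--         best = 0
--         best_d = -1
--         for i, d in enumerate(mind):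
--             if d > best_d:
--                 best_d = d
--                 best = i
--         selected.append(best)
--         fb = feats[best]
--         mind[best] = -1
--         for i, (a, b) in enumerate(feats):
--             if mind[i] >= 0:
--                 d = abs(a - fb[0]) + abs(b - fb[1])
--                 if d < mind[i]:
--                     mind[i] = d
--     return selected
-- ===== Notes on version B (the rewrite author's own statement) =====
-- stated objective: faster
-- what changed: Instead of recomputing, for every candidate in every round, the minimum distance to all already-selected indices, B maintains one per-candidate min-distance array (with -1 marking selected indices) that is updated once per selection, so each round is a single argmax scan plus a single update pass.
import Mathlib
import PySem

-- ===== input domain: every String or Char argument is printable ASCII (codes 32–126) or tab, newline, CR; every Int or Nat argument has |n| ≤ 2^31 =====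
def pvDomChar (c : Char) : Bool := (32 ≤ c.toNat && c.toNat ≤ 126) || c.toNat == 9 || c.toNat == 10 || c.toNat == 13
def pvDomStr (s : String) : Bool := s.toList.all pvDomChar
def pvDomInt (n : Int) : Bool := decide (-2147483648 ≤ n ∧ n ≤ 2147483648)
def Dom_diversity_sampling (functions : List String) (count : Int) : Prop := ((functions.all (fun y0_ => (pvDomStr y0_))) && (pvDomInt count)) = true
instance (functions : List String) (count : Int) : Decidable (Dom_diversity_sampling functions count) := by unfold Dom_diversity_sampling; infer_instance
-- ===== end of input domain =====

-- B replaces A's per-round recomputation of every candidate's min distance to the selected set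
-- by one incrementally updated min-distance array (faster in a timing run; asymptotic).


-- ===== PORT A =====
-- feature extraction: (len(func.split('\n')), func.count('if')+…) — identical line in both Pythons
def pvFeat (f : String) : Int × Int :=
  (((PySem.Chars.splitOn f.toList ['\n']).length : Int),
   ((PySem.Str.count f "if" : Int) + (PySem.Str.count f "for" : Int)
      + (PySem.Str.count f "while" : Int) + (PySem.Str.count f "try" : Int)))

-- abs(a0-b0) + abs(a1-b1)
def pvDist (a b : Int × Int) : Int := |a.1 - b.1| + |a.2 - b.2|

-- inner 'for selected_idx in selected_indices: min_distance = min(min_distance, distance)';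
-- none = float('inf') start.  Indices appended by A are always in range, so getD's default is never used.
def pvMinOverA (features : List (Int × Int)) (selected : List Int) (feat : Int × Int) : Option Int :=
  selected.foldl (fun md s =>
    let d := pvDist feat (features.getD s.toNat (0, 0))
    some (match md with | none => d | some m => min m d)) none

-- one body of A's 'for i, feature in enumerate(function_features)'.  When selected is empty the
-- condition short-circuits on len==0 and the stored best_distance (inf in Python) is never read,
-- so storing md.getD 0 there is value-equivalent.
def pvStepA (features : List (Int × Int)) (selected : List Int) (st : Int × Int) (p : Int × (Int × Int)) : Int × Int :=
  if p.1 ∈ selected then st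
  else
    let md := (pvMinOverA features selected p.2).getD 0
    if selected.isEmpty || md > st.2 then (p.1, md) else st

-- the scan producing (best_idx, best_distance), starting from (0, -1)
def pvScanA (features : List (Int × Int)) (selected : List Int) : Int × Int :=
  (PySem.List.enumerate features 0).foldl (pvStepA features selected) (0, -1)

-- the while loop: it appends exactly one index per iteration and runs while
-- len(selected) < min(count, n), i.e. exactly (min count n).toNat times from [].
def pvLoopA (features : List (Int × Int)) : Nat → List Int → List Int
  | 0, selected => selected
  | fuel + 1, selected => pvLoopA features fuel (selected ++ [(pvScanA features selected).1])

def diversity_sampling (functions : List String) (count : Int) : List Int :=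
  let features := functions.map pvFeat
  pvLoopA features (min count (functions.length : Int)).toNat []

-- ===== PORT B =====
-- argmax scan of Source B: best=0, best_d=-1; for i,d in enumerate(mind): if d > best_d: update
def pvArgmaxB (mind : List Int) : Int × Int :=
  (PySem.List.enumerate mind 0).foldl (fun st p => if p.2 > st.2 then (p.1, p.2) else st) (0, -1)

-- Source B's update pass 'for i,(a,b) in enumerate(feats): if mind[i] >= 0: …' as the same
-- positionwise computation over the zipped lists
def pvUpdateB (fb : Int × Int) (feats : List (Int × Int)) (mind : List Int) : List Int :=
  (feats.zip mind).map (fun q =>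
    if q.2 ≥ 0 then (let d := pvDist q.1 fb; if d < q.2 then d else q.2) else q.2)

-- 'for _ in range(m - 1)': pick argmax, append, mark -1, update the array
def pvLoopB (feats : List (Int × Int)) : Nat → List Int → List Int → List Int
  | 0, selected, _ => selected
  | k + 1, selected, mind =>
      let best := (pvArgmaxB mind).1
      let fb := feats.getD best.toNat (0, 0)
      let mind' := pvUpdateB fb feats (mind.set best.toNat (-1))
      pvLoopB feats k (selected ++ [best]) mind'

def diversity_sampling_alt (functions : List String) (count : Int) : List Int :=
  let feats := functions.map pvFeat
  let n := functions.length
  let m := min count (n : Int)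
  if m ≤ 0 then []
  else
    let last := feats.getD (n - 1) (0, 0)
    let mind0 := (feats.map (fun f => pvDist f last)).set (n - 1) (-1)
    pvLoopB feats (m.toNat - 1) [(n : Int) - 1] mind0

-- ===== PRECONDITION & SPEC =====
def Spec_diversity_sampling (functions : List String) (count : Int) (out : List Int) : Prop := out = diversity_sampling_alt functions count
instance (functions : List String) (count : Int) (out : List Int) : Decidable (Spec_diversity_sampling functions count out) := by unfold Spec_diversity_sampling; infer_instance

-- ===== CLAIM (what is proved, stated in full; the proofs are below) =====
def Claim_equal_diversity_sampling : Prop := ∀ (functions : List String) (count : Int), Dom_diversity_sampling functions count → Spec_diversity_sampling functions count (diversity_sampling functions count)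

-- ===== LEMMAS AND PROOFS =====

-- mind is B's incremental array: -1 on selected indices, else A's min distance to selected
def pvMindSpec (features : List (Int × Int)) (selected : List Int) (mind : List Int) : Prop :=
  mind.length = features.length ∧
  ∀ j (h : j < features.length),
    mind[j]? = some (if (j : Int) ∈ selected then -1
                     else (pvMinOverA features selected features[j]).getD 0)

lemma pvDist_nonneg (a b : Int × Int) : 0 ≤ pvDist a b := by
  unfold pvDist; positivity

lemma pvMinOverA_aux (features : List (Int × Int)) (feat : Int × Int) :
    ∀ (l : List Int) (m : Int), 0 ≤ m →
      ∃ r, l.foldl (fun md s =>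
          let d := pvDist feat (features.getD s.toNat (0, 0))
          some (match md with | none => d | some m => min m d)) (some m) = some r ∧ 0 ≤ r := by
  intro l
  induction l with
  | nil => intro m hm; exact ⟨m, rfl, hm⟩
  | cons s t ih =>
      intro m hm
      simpa using ih (min m (pvDist feat (features.getD s.toNat (0, 0))))
        (le_min hm (pvDist_nonneg _ _))

lemma pvMinOverA_some (features : List (Int × Int)) (selected : List Int) (hne : selected ≠ [])
    (feat : Int × Int) : ∃ r, pvMinOverA features selected feat = some r ∧ 0 ≤ r := by
  cases selected with
  | nil => exact absurd rfl hne
  | cons s t =>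
      unfold pvMinOverA
      simpa using pvMinOverA_aux features feat t (pvDist feat (features.getD s.toNat (0, 0)))
        (pvDist_nonneg _ _)

lemma pvScanA_aux (features : List (Int × Int)) (selected : List Int) (hne : selected ≠ []) :
    ∀ (fs : List (Int × Int)) (ms : List Int) (k : Int) (st : Int × Int), -1 ≤ st.2 →
      ms.length = fs.length →
      (∀ j (h : j < fs.length), ms[j]? = some (if (k + (j : Int)) ∈ selected then -1
          else (pvMinOverA features selected fs[j]).getD 0)) →
      (PySem.List.enumerate fs k).foldl (pvStepA features selected) st
        = (PySem.List.enumerate ms k).foldl (fun st p => if p.2 > st.2 then (p.1, p.2) else st) st := by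
  intro fs
  induction fs with
  | nil =>
      intro ms k st _ hlen _
      rw [List.length_nil, List.length_eq_zero_iff] at hlen
      subst hlen; rfl
  | cons f fs ih =>
      intro ms k st hst hlen hspec
      cases ms with
      | nil => simp at hlen
      | cons m ms =>
          rw [PySem.List.enumerate_cons, PySem.List.enumerate_cons, List.foldl_cons, List.foldl_cons]
          have h0 := hspec 0 (by simp)
          simp only [List.getElem?_cons_zero, Option.some.injEq, List.getElem_cons_zero,
            Int.natCast_zero, add_zero] at h0
          have hstep : pvStepA features selected st (k, f)
              = (if m > st.2 then ((k : Int), m) else st) ∧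
              -1 ≤ (if m > st.2 then ((k : Int), m) else st).2 := by
            unfold pvStepA
            by_cases hk : (k : Int) ∈ selected
            · rw [if_pos hk, h0, if_pos hk]
              rw [if_neg (by omega)]
              exact ⟨rfl, hst⟩
            · rw [if_neg hk, h0, if_neg hk]
              obtain ⟨r, hr, hr0⟩ := pvMinOverA_some features selected hne f
              have hie : selected.isEmpty = false := by simp [hne]
              simp only [hie, hr, Bool.false_or, decide_eq_true_eq, Option.getD_some]
              by_cases hgt : r > st.2
              · rw [if_pos hgt]
                refine ⟨trivial, ?_⟩
                show (-1 : Int) ≤ r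
                omega
              · rw [if_neg hgt]
                exact ⟨trivial, hst⟩
          rw [hstep.1]
          apply ih ms (k + 1) _ hstep.2 (by simpa using hlen)
          intro j hj
          have := hspec (j + 1) (by simpa using Nat.succ_lt_succ hj)
          simpa [add_assoc, add_comm, add_left_comm] using this

lemma pvScanA_eq_argmax (features : List (Int × Int)) (selected : List Int) (hne : selected ≠ [])
    (mind : List Int) (hspec : pvMindSpec features selected mind) :
    pvScanA features selected = pvArgmaxB mind := by
  unfold pvScanA pvArgmaxB
  exact pvScanA_aux features selected hne features mind 0 (0, -1) (by norm_num)
    hspec.1 (fun j hj => by simpa using hspec.2 j hj)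

lemma pvArgmaxB_aux :
    ∀ (l : List Int) (k : Int) (st : Int × Int),
      ((PySem.List.enumerate l k).foldl (fun st p => if p.2 > st.2 then (p.1, p.2) else st) st).1 = st.1 ∨
      (k ≤ ((PySem.List.enumerate l k).foldl (fun st p => if p.2 > st.2 then (p.1, p.2) else st) st).1 ∧
       ((PySem.List.enumerate l k).foldl (fun st p => if p.2 > st.2 then (p.1, p.2) else st) st).1 < k + l.length) := by
  intro l
  induction l with
  | nil => intro k st; left; simp [PySem.List.enumerate_nil]
  | cons d t ih =>
      intro k st
      rw [PySem.List.enumerate_cons, List.foldl_cons]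
      by_cases hd : d > st.2
      · rw [if_pos hd]
        rcases ih (k + 1) (k, d) with h | h
        · right; rw [h]; simp only [List.length_cons]; push_cast; omega
        · right; simp only [List.length_cons]; push_cast; omega
      · rw [if_neg hd]
        rcases ih (k + 1) st with h | h
        · left; rw [h]
        · right; simp only [List.length_cons]; push_cast; omega

lemma pvArgmaxB_range (mind : List Int) (hne : mind ≠ []) :
    0 ≤ (pvArgmaxB mind).1 ∧ (pvArgmaxB mind).1 < (mind.length : Int) := by
  unfold pvArgmaxB
  have hpos : 0 < mind.length := List.length_pos_of_ne_nil hne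
  rcases pvArgmaxB_aux mind 0 (0, -1) with h | h
  · rw [h]
    refine ⟨le_refl _, ?_⟩
    show (0 : Int) < (mind.length : Int)
    exact_mod_cast hpos
  · exact ⟨h.1, by omega⟩

lemma pvMindSpec_update (features : List (Int × Int)) (selected : List Int) (hne : selected ≠ [])
    (mind : List Int) (hspec : pvMindSpec features selected mind) (b : Int)
    (hb0 : 0 ≤ b) (hblt : (b : Int) < (features.length : Int)) :
    pvMindSpec features (selected ++ [b])
      (pvUpdateB (features.getD b.toNat (0, 0)) features (mind.set b.toNat (-1))) := by
  obtain ⟨hlen, hval⟩ := hspec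
  have hbn : b.toNat < features.length := by omega
  constructor
  · simp [pvUpdateB, hlen]
  · intro j hj
    have hjm : j < mind.length := by omega
    have hjz : j < (features.zip (mind.set b.toNat (-1))).length := by
      rw [List.length_zip, List.length_set, hlen]; omega
    have hget : (pvUpdateB (features.getD b.toNat (0, 0)) features (mind.set b.toNat (-1)))[j]?
        = some (let q := (features[j], (mind.set b.toNat (-1))[j]'(by simp only [List.length_set]; omega));
            if q.2 ≥ 0 then (let d := pvDist q.1 (features.getD b.toNat (0, 0));
              if d < q.2 then d else q.2) else q.2) := by
      unfold pvUpdateB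
      rw [List.getElem?_map, List.getElem?_eq_getElem hjz, List.getElem_zip]
      rfl
    rw [hget]
    have hmj := hval j hj
    rw [List.getElem?_eq_getElem hjm] at hmj
    have hmj' : mind[j] = (if (j : Int) ∈ selected then -1
        else (pvMinOverA features selected features[j]).getD 0) := by
      exact Option.some.inj hmj
    by_cases hjb : (j : Int) = b
    · -- j is the newly selected index: marked -1
      have hjb' : b.toNat = j := by omega
      have hset : (mind.set b.toNat (-1))[j]'(by simp only [List.length_set]; omega) = -1 := by
        rw [hjb']; exact List.getElem_set_self (by simp only [List.length_set]; omega)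
      simp only [hset]
      norm_num
      simp [hjb]
    · -- j keeps its old entry, updated with the new distance
      have hset : (mind.set b.toNat (-1))[j]'(by simp only [List.length_set]; omega) = mind[j] := by
        apply List.getElem_set_ne
        omega
      simp only [hset, hmj']
      by_cases hjs : (j : Int) ∈ selected
      · rw [if_pos hjs]
        norm_num
        simp [hjs]
      · rw [if_neg hjs]
        obtain ⟨r, hr, hr0⟩ := pvMinOverA_some features selected hne features[j]
        have hmem : (j : Int) ∉ selected ++ [b] := by
          simp [hjs, hjb]
        rw [if_neg hmem]
        have happ : pvMinOverA features (selected ++ [b]) features[j]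
            = some (min r (pvDist features[j] (features.getD b.toNat (0, 0)))) := by
          unfold pvMinOverA at hr ⊢
          rw [List.foldl_append, hr]
          rfl
        rw [hr, happ]
        simp only [Option.getD_some]
        congr 1
        rw [if_pos (show r ≥ 0 by omega), min_def]
        split_ifs <;> omega

lemma pvLoop_eq (features : List (Int × Int)) :
    ∀ (fuel : Nat) (selected : List Int) (mind : List Int), selected ≠ [] →
      pvMindSpec features selected mind →
      pvLoopA features fuel selected = pvLoopB features fuel selected mind := by
  intro fuel
  induction fuel with
  | zero => intro selected mind _ _; rfl
  | succ fuel ih =>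
      intro selected mind hne hspec
      rw [pvLoopA, pvLoopB, pvScanA_eq_argmax features selected hne mind hspec]
      rcases List.eq_nil_or_concat features with hf | ⟨_, _, hf⟩
      · -- no functions: the update keeps the empty array, the spec is vacuous
        subst hf
        apply ih _ _ (by simp)
        constructor
        · simp [pvUpdateB]
        · intro j hj; simp at hj
      · have hfe : features ≠ [] := by subst hf; simp
        have hme : mind ≠ [] := by
          intro h; rw [h] at hspec; have := hspec.1; simp at this
          exact hfe (List.length_eq_zero_iff.mp this.symm)
        obtain ⟨hb0, hblt⟩ := pvArgmaxB_range mind hme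
        apply ih _ _ (by simp)
        exact pvMindSpec_update features selected hne mind hspec _ hb0 (by rw [← hspec.1]; exact hblt)

lemma pvFirstPick (features : List (Int × Int)) (hne : features ≠ []) :
    (pvScanA features []).1 = (features.length : Int) - 1 := by
  have aux : ∀ (fs : List (Int × Int)) (k : Int) (st : Int × Int), fs ≠ [] →
      (PySem.List.enumerate fs k).foldl (pvStepA features []) st = (k + fs.length - 1, 0) := by
    intro fs
    induction fs with
    | nil => intro _ _ h; exact absurd rfl h
    | cons f fs ihf =>
        intro k st _
        rw [PySem.List.enumerate_cons, List.foldl_cons]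
        have hstep : pvStepA features [] st (k, f) = (k, 0) := by
          unfold pvStepA pvMinOverA
          simp
        rw [hstep]
        cases fs with
        | nil => simp [PySem.List.enumerate_nil]
        | cons g gs =>
            rw [ihf (k + 1) (k, 0) (by simp)]
            simp only [List.length_cons]
            push_cast
            ring_nf
  unfold pvScanA
  rw [aux features 0 (0, -1) hne]
  simp

-- B's initial array is A's min-distance map for the singleton selection [n-1]
lemma pvMindSpec_init (features : List (Int × Int)) (hne : features ≠ []) :
    pvMindSpec features [(features.length : Int) - 1]
      ((features.map (fun f => pvDist f (features.getD (features.length - 1) (0, 0)))).set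
        (features.length - 1) (-1)) := by
  have hn : 0 < features.length := List.length_pos_of_ne_nil hne
  constructor
  · simp
  · intro j hj
    have hjl : j < ((features.map (fun f => pvDist f (features.getD (features.length - 1) (0, 0)))).set
        (features.length - 1) (-1)).length := by
      simp only [List.length_set, List.length_map]; omega
    rw [List.getElem?_eq_getElem hjl]
    by_cases hjn : j = features.length - 1
    · have hv : ((features.map (fun f => pvDist f (features.getD (features.length - 1) (0, 0)))).set
          (features.length - 1) (-1))[j]'hjl = -1 := by
        subst hjn
        exact List.getElem_set_self (by simp only [List.length_set, List.length_map]; omega)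
      rw [hv, if_pos (by simp only [List.mem_singleton]; omega)]
    · have hv : ((features.map (fun f => pvDist f (features.getD (features.length - 1) (0, 0)))).set
          (features.length - 1) (-1))[j]'hjl
          = pvDist features[j] (features.getD (features.length - 1) (0, 0)) := by
        rw [List.getElem_set_ne (by omega), List.getElem_map]
      rw [hv, if_neg (by simp only [List.mem_singleton]; omega)]
      have ht : ((features.length : Int) - 1).toNat = features.length - 1 := by omega
      unfold pvMinOverA
      rw [List.foldl_cons, List.foldl_nil]
      simp only [ht, Option.getD_some]

-- ===== VERDICT (by name: the statement is the Claim_ definition above) =====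
theorem diversity_sampling_spec : Claim_equal_diversity_sampling := by
  intro functions count _
  show diversity_sampling functions count = diversity_sampling_alt functions count
  simp only [diversity_sampling, diversity_sampling_alt]
  by_cases hm : min count ((functions.length : Int)) ≤ 0
  · rw [if_pos hm, Int.toNat_of_nonpos hm]
    rfl
  · rw [if_neg hm]
    have hn : 0 < functions.length := by
      have := min_le_right count (functions.length : Int)
      omega
    have hfe : functions.map pvFeat ≠ [] := by
      simp only [ne_eq, List.map_eq_nil_iff]
      exact List.ne_nil_of_length_pos hn
    have hfuel : (min count ((functions.length : Int))).toNat
        = ((min count ((functions.length : Int))).toNat - 1) + 1 := by omega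
    rw [hfuel, pvLoopA, pvFirstPick _ hfe]
    simp only [List.nil_append, List.length_map]
    exact pvLoop_eq _ _ _ _ (by simp)
      (by simpa only [List.length_map] using pvMindSpec_init (functions.map pvFeat) hfe)
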